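-- pv_equiv track=rewrite | github.com/wantyouring/Algorithm | 타일 장식물.py | solution
-- ===== SOURCE A (Python) =====
-- def solution(N):
--     answer = 0
--     a = []
--     if N==1 or N==2:
--         return 1
--     a.append(1)
--     a.append(1)
--
--     for i in range(2,N+1):
--         a.append(a[i-1] + a[i-2])
--     answer = (a[N-1] + a[N])*2
--
--     return answer
-- ===== SOURCE B (Python) =====
-- def solution(N):
--     if N == 1 or N == 2:
--         return 1
--     # perimeter = 2 * F(N+2) with standard Fibonacci F(1)=F(2)=1, via fast doubling
--     def fib_pair(n):  # returns (F(n), F(n+1))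
--         if n == 0:
--             return (0, 1)
--         a, b = fib_pair(n >> 1)
--         c = a * (2 * b - a)
--         d = a * a + b * b
--         if n & 1:
--             return (d, c + d)
--         return (c, d)
--     return 2 * fib_pair(N + 2)[0]
-- ===== Notes on version B (the rewrite author's own statement) =====
-- stated objective: faster
-- what changed: Replaces A's O(N) list-building Fibonacci loop with O(log N) fast-doubling recursion, using the identity a[N-1]+a[N] = F(N+2).
-- outside the precondition, e.g. on solution(0): A returns 4, B returns 2; on solution(-1): A returns 4, B returns 2
import Mathlib
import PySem

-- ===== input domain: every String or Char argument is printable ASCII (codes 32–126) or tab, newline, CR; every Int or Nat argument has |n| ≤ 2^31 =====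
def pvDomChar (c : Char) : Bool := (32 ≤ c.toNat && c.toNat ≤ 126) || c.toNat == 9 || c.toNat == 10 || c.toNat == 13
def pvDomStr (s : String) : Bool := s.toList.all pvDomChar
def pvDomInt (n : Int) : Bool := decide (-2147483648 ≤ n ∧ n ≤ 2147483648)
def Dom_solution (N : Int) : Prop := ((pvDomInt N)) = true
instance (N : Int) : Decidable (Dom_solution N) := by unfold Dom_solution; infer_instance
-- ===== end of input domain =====

-- B replaces A's O(N) Fibonacci list loop with O(log N) fast-doubling; faster (asymptotic).

-- ===== PORT A =====
-- literal port: builds the list a with a loop over range(2, N+1), then (a[N-1]+a[N])*2;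
-- indexing is via pyGetD with default 0 — always in range on Pre_ (N ≥ 1).
def solution (N : Int) : Int :=
  if N == 1 || N == 2 then 1
  else
    let a : List Int := (PySem.List.pyRange 2 (N + 1) 1).foldl
      (fun a i => a ++ [PySem.List.pyGetD a (i - 1) 0 + PySem.List.pyGetD a (i - 2) 0]) [1, 1]
    (PySem.List.pyGetD a (N - 1) 0 + PySem.List.pyGetD a N 0) * 2

-- ===== PORT B =====
-- fast doubling: fibPair n = (F(n), F(n+1)); recursion on n >> 1 (= n / 2), as in Source B.
-- The recursion argument is Nat: on Pre_ (N ≥ 1) the Python argument N+2 is nonnegative.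
def fibPair : Nat → Int × Int
  | 0 => (0, 1)
  | (n + 1) =>
    let p := fibPair ((n + 1) / 2)
    let a := p.1
    let b := p.2
    let c := a * (2 * b - a)
    let d := a * a + b * b
    if (n + 1) % 2 == 1 then (d, c + d) else (c, d)
decreasing_by exact Nat.div_lt_self (Nat.succ_pos n) (by norm_num)

def solution_alt (N : Int) : Int :=
  if N == 1 || N == 2 then 1
  else 2 * (fibPair (N + 2).toNat).1

-- ===== PRECONDITION & SPEC =====
-- Pre_ restricts to the natural domain N ≥ 1 (a positive number of tiles): for N ≤ -2 A raises
-- IndexError, and for N ∈ {-1, 0} A's value 4 is an accident of negative-index wraparound on [1,1].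
def Pre_solution (N : Int) : Prop := 1 ≤ N
instance (N : Int) : Decidable (Pre_solution N) := by unfold Pre_solution; infer_instance
def pvWitness_solution : Int := (5)
def Spec_solution (N : Int) (out : Int) : Prop := out = solution_alt N
instance (N : Int) (out : Int) : Decidable (Spec_solution N out) := by unfold Spec_solution; infer_instance

-- ===== CLAIM (what is proved, stated in full; the proofs are below) =====
def Claim_equal_solution : Prop := ∀ (N : Int), Dom_solution N → Pre_solution N → Spec_solution N (solution N)

-- ===== LEMMAS AND PROOFS =====

-- fast doubling is correct
theorem fibPair_eq (n : Nat) : fibPair n = ((Nat.fib n : Int), (Nat.fib (n + 1) : Int)) := by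
  induction n using Nat.strong_induction_on with
  | _ n ih =>
    match n with
    | 0 => simp [fibPair]
    | (m + 1) =>
      have hlt : (m + 1) / 2 < m + 1 := Nat.div_lt_self (Nat.succ_pos m) (by norm_num)
      have h : fibPair ((m + 1) / 2)
          = ((Nat.fib ((m + 1) / 2) : Int), (Nat.fib ((m + 1) / 2 + 1) : Int)) := ih _ hlt
      obtain ⟨k, hk⟩ : ∃ k, (m + 1) / 2 = k := ⟨_, rfl⟩
      rw [hk] at h
      have hle : Nat.fib k ≤ 2 * Nat.fib (k + 1) :=
        le_trans (Nat.fib_le_fib_succ) (by omega)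
      have heven : Nat.fib (2 * k) = Nat.fib k * (2 * Nat.fib (k + 1) - Nat.fib k) :=
        Nat.fib_two_mul k
      have hodd : Nat.fib (2 * k + 1) = Nat.fib (k + 1) ^ 2 + Nat.fib k ^ 2 :=
        Nat.fib_two_mul_add_one k
      rcases Nat.even_or_odd (m + 1) with he | ho
      · -- m + 1 = 2 * k
        have h2 : m + 1 = 2 * k := by rcases he with ⟨t, ht⟩; omega
        have hmod : (m + 1) % 2 = 0 := by omega
        simp only [fibPair, hk, h, hmod]
        norm_num
        refine ⟨?_, ?_⟩
        · rw [h2, heven]; zify [hle]; try ring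
        · rw [show m + 1 + 1 = 2 * k + 1 by omega, hodd]; push_cast; ring
      · -- m + 1 = 2 * k + 1
        have h2 : m + 1 = 2 * k + 1 := by rcases ho with ⟨t, ht⟩; omega
        have hmod : (m + 1) % 2 = 1 := by omega
        simp only [fibPair, hk, h, hmod]
        norm_num
        refine ⟨?_, ?_⟩
        · rw [h2, hodd]; push_cast; ring
        · rw [show m + 1 + 1 = 2 * k + 2 by omega, Nat.fib_add_two (n := 2 * k), heven, hodd]
          zify [hle]; ring

-- A's loop builds the Fibonacci table: after iterating range(2, k+1) the list is
-- [F(1), F(2), …, F(k+1)].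
theorem loop_eq (k : Nat) (hk : 1 ≤ k) :
    (PySem.List.pyRange 2 ((k : Int) + 1) 1).foldl
      (fun a i => a ++ [PySem.List.pyGetD a (i - 1) 0 + PySem.List.pyGetD a (i - 2) 0]) [1, 1]
    = (List.range (k + 1)).map (fun j => (Nat.fib (j + 1) : Int)) := by
  induction k with
  | zero => omega
  | succ m ih =>
    by_cases hm : 1 ≤ m
    · have hsplit : PySem.List.pyRange 2 ((m : Int) + 1 + 1) 1
          = PySem.List.pyRange 2 ((m : Int) + 1) 1 ++ [(m : Int) + 1] := by
        have := PySem.List.pyRange_one_succ_right (a := 2) (b := (m : Int) + 1) (by omega)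
        simpa using this
      have hcast : ((m : Int) + 1 + 1) = (((m + 1 : Nat) : Int) + 1) := by push_cast; ring
      rw [← hcast, hsplit, List.foldl_append, ih hm]
      have hlen : ((List.range (m + 1)).map (fun j => (Nat.fib (j + 1) : Int))).length = m + 1 := by
        simp
      have hg1 : PySem.List.pyGetD ((List.range (m + 1)).map (fun j => (Nat.fib (j + 1) : Int)))
          ((m : Int) + 1 - 1) 0 = (Nat.fib (m + 1) : Int) := by
        have hm' : (m : Int) + 1 - 1 = (m : Nat) := by ring
        rw [hm', PySem.List.pyGetD_natCast]
        simp [List.getD]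
      have hg2 : PySem.List.pyGetD ((List.range (m + 1)).map (fun j => (Nat.fib (j + 1) : Int)))
          ((m : Int) + 1 - 2) 0 = (Nat.fib m : Int) := by
        rcases Nat.exists_eq_add_of_le hm with ⟨t, ht⟩
        subst ht
        have hm' : ((1 + t : Nat) : Int) + 1 - 2 = (t : Nat) := by push_cast; ring
        rw [hm', PySem.List.pyGetD_natCast]
        have hlt : t < 1 + (t + 1) := by omega
        simp [List.getD, hlt, Nat.add_comm]
      simp only [List.foldl, hg1, hg2]
      conv_rhs => rw [List.range_succ, List.map_append]
      congr 1
      have hf : Nat.fib (m + 1 + 1) = Nat.fib m + Nat.fib (m + 1) := Nat.fib_add_two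
      simp [hf]
      ring
    · -- m = 0 : base case k = 1
      have hm0 : m = 0 := by omega
      subst hm0
      rw [PySem.List.pyRange_one_eq_nil (by norm_num)]
      simp [List.range_succ]
  
theorem solution_spec : Claim_equal_solution := by
  intro N _ hpre
  unfold Spec_solution solution solution_alt
  by_cases h12 : N == 1 || N == 2
  · simp [h12]
  · simp only [h12, Bool.false_eq_true, if_false]
    have hN3 : 3 ≤ N := by
      simp only [Bool.or_eq_true, beq_iff_eq] at h12
      unfold Pre_solution at hpre
      omega
    obtain ⟨k, hk⟩ : ∃ k : Nat, N = (k : Int) := ⟨N.toNat, by omega⟩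
    subst hk
    have hk3 : 3 ≤ k := by exact_mod_cast hN3
    rw [loop_eq k (by omega)]
    have hg1 : PySem.List.pyGetD ((List.range (k + 1)).map (fun j => (Nat.fib (j + 1) : Int)))
        ((k : Int) - 1) 0 = (Nat.fib k : Int) := by
      rcases Nat.exists_eq_add_of_le hk3 with ⟨t, ht⟩
      subst ht
      have : ((3 + t : Nat) : Int) - 1 = ((2 + t : Nat) : Int) := by push_cast; ring
      rw [this, PySem.List.pyGetD_natCast]
      simp [List.getD, show 2 + t + 1 = 3 + t from by omega]
    have hg2 : PySem.List.pyGetD ((List.range (k + 1)).map (fun j => (Nat.fib (j + 1) : Int)))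
        ((k : Int)) 0 = (Nat.fib (k + 1) : Int) := by
      rw [PySem.List.pyGetD_natCast]
      simp [List.getD]
    rw [hg1, hg2]
    have ht : ((k : Int) + 2).toNat = k + 2 := by omega
    rw [ht, fibPair_eq]
    have : Nat.fib (k + 2) = Nat.fib k + Nat.fib (k + 1) := Nat.fib_add_two
    push_cast [this]
    ring
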